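-- pv_equiv track=rewrite | github.com/croductive/cw-exercises | 167-6kyu-string-more_zeros.py | filter_binaries
-- ===== SOURCE A (Python) =====
-- def filter_binaries(val):
--     zero_counter=0
--     while val >0:
--         if val & 1:
--             zero_counter -= 1
--         else:
--             zero_counter += 1
--         val >>= 1
--     return zero_counter>0
-- ===== SOURCE B (Python) =====
-- def filter_binaries(val):
--     # closed form: zeros = bit_length - ones, so zeros > ones iff bit_length > 2*ones
--     if val < 0:
--         return False
--     return val.bit_length() > 2 * val.bit_count()
-- ===== Notes on version B (the rewrite author's own statement) =====
-- stated objective: simpler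
-- what changed: Replaced the bit-shifting while loop that maintains a zeros-minus-ones counter with a closed-form comparison of bit_length against twice bit_count, using the identity zeros = bit_length - ones.
import Mathlib
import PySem

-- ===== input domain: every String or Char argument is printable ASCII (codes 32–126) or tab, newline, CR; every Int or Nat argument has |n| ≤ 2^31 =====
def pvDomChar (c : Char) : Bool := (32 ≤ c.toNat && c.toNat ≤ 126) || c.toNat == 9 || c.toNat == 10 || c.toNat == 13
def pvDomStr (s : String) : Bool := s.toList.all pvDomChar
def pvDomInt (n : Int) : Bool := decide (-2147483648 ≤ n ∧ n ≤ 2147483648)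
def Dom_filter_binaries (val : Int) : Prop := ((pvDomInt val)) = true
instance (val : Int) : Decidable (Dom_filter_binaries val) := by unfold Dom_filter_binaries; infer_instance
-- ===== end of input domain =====

-- B replaces A's bit-shifting counter loop with the closed form bit_length > 2*bit_count (simpler).

-- ===== PORT A =====
-- A's while loop; 'val >>= 1' is floor division by 2 (exact, also the Python semantics of >> 1)
def pvLoopA (val zc : Int) : Int :=
  if h : 0 < val then
    pvLoopA (PySem.Int.floordiv val 2)
      (if PySem.Int.band val 1 ≠ 0 then zc - 1 else zc + 1)
  else zc
termination_by val.toNat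
decreasing_by
  rw [PySem.Int.floordiv_eq_ediv_of_pos (by omega)]
  omega

def filter_binaries (val : Int) : Bool := decide (0 < pvLoopA val 0)

-- ===== PORT B =====
def filter_binaries_alt (val : Int) : Bool :=
  if val < 0 then false
  else decide (2 * PySem.Int.bitCount val < PySem.Int.bitLength val)

-- ===== PRECONDITION & SPEC =====
def Spec_filter_binaries (val : Int) (out : Bool) : Prop := out = filter_binaries_alt val
instance (val : Int) (out : Bool) : Decidable (Spec_filter_binaries val out) := by unfold Spec_filter_binaries; infer_instance

-- ===== CLAIM (what is proved, stated in full; the proofs are below) =====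
def Claim_equal_filter_binaries : Prop := ∀ (val : Int), Dom_filter_binaries val → Spec_filter_binaries val (filter_binaries val)

-- ===== LEMMAS AND PROOFS =====
theorem pvLoopA_eq (val zc : Int) :
    pvLoopA val zc =
      if 0 < val then zc + (PySem.Int.bitLength val : Int) - 2 * (PySem.Int.bitCount val : Int)
      else zc := by
  induction val, zc using pvLoopA.induct with
  | case1 val zc h ih =>
    have h2 : PySem.Int.floordiv val 2 = val / 2 := PySem.Int.floordiv_eq_ediv_of_pos (by omega)
    rw [pvLoopA, dif_pos h]
    simp only [dite_eq_ite] at ih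
    rw [ih, if_pos h, PySem.Int.bitLength_of_pos h, PySem.Int.bitCount_of_pos h,
        PySem.Int.band_one, PySem.Int.mod_eq_emod_of_pos (by omega), h2]
    by_cases hq : 0 < val / 2
    · rw [if_pos hq]
      have hm : val % 2 = 0 ∨ val % 2 = 1 := by omega
      rcases hm with hm | hm <;> rw [hm] <;> simp <;> omega
    · have hv : val = 1 := by omega
      subst hv
      simp [PySem.Int.bitLength_zero, PySem.Int.bitCount_zero]
      omega
  | case2 val zc h =>
    rw [pvLoopA, dif_neg h, if_neg h]

theorem filter_binaries_spec : Claim_equal_filter_binaries := by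
  intro val _
  unfold Spec_filter_binaries filter_binaries filter_binaries_alt
  rw [pvLoopA_eq]
  by_cases h : 0 < val
  · rw [if_pos h, if_neg (by omega)]
    simp; omega
  · rw [if_neg h]
    by_cases hn : val < 0
    · simp [hn]
    · have h0 : val = 0 := by omega
      subst h0
      simp [PySem.Int.bitLength_zero, PySem.Int.bitCount_zero]
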